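-- pv_equiv track=rewrite | github.com/scmartinez-gus/gepbillingengine | billing_dashboard.py | _audit_status
-- ===== SOURCE A (Python) =====
-- from typing import Any, Dict, List, Optional
--
-- def _audit_status(audit_rows: List[Dict[str, Any]]) -> str:
--     statuses = [str(row.get("Status", "")).upper() for row in audit_rows]
--     if any(s == "FAIL" for s in statuses):
--         return "FAIL"
--     if any(s == "REVIEW REQUIRED" for s in statuses):
--         return "REVIEW REQUIRED"
--     if any(s == "PASS" for s in statuses):
--         return "PASS"
--     return "UNKNOWN"
-- ===== SOURCE B (Python) =====
-- from typing import Any, Dict, List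
--
-- _RANK = {"FAIL": 0, "REVIEW REQUIRED": 1, "PASS": 2}
-- _LABELS = ["FAIL", "REVIEW REQUIRED", "PASS", "UNKNOWN"]
--
-- def _audit_status(audit_rows: List[Dict[str, Any]]) -> str:
--     best = 3
--     for row in audit_rows:
--         r = _RANK.get(str(row.get("Status", "")).upper(), 3)
--         if r < best:
--             best = r
--     return _LABELS[best]
-- ===== Notes on version B (the rewrite author's own statement) =====
-- stated objective: simpler
-- what changed: Replaced the statuses list plus three ordered any-scans with a single rank-minimizing pass over the rows and a table lookup on the minimum rank.
import Mathlib
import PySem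

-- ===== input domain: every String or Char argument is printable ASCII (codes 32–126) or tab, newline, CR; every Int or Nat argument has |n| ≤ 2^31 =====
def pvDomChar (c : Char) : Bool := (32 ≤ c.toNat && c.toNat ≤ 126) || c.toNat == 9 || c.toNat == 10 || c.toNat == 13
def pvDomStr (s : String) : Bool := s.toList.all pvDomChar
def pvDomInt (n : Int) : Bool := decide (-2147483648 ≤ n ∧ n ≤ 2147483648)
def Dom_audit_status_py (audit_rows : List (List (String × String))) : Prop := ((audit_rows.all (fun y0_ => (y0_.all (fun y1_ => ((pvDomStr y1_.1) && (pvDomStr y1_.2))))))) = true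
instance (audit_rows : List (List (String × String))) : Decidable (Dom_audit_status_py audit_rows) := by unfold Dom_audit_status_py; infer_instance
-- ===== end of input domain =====

-- B replaces A's statuses list plus three ordered any-scans with a single
-- rank-minimizing pass over the rows and a table lookup (objective: simpler).

-- ===== PORT A =====
def audit_status_py (audit_rows : List (List (String × String))) : String :=
  let statuses := audit_rows.map
    (fun row => PySem.Str.upper (PySem.Dict.getD (PySem.Dict.mk row) "Status" ""))
  if statuses.any (fun s => s == "FAIL") then "FAIL"
  else if statuses.any (fun s => s == "REVIEW REQUIRED") then "REVIEW REQUIRED"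
  else if statuses.any (fun s => s == "PASS") then "PASS"
  else "UNKNOWN"

-- ===== PORT B =====
-- _RANK.get(k, 3) on the literal dict is ported as the literal PySem.Dict;
-- _LABELS[best] (best is always in range: 0 ≤ best ≤ 3) as List.getD.
def audit_status_py_alt (audit_rows : List (List (String × String))) : String :=
  let best := audit_rows.foldl (fun b row =>
    let r := PySem.Dict.getD (PySem.Dict.mk [("FAIL", 0), ("REVIEW REQUIRED", 1), ("PASS", 2)])
        (PySem.Str.upper (PySem.Dict.getD (PySem.Dict.mk row) "Status" "")) 3
    if r < b then r else b) (3 : Nat)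
  List.getD ["FAIL", "REVIEW REQUIRED", "PASS", "UNKNOWN"] best "UNKNOWN"

-- ===== PRECONDITION & SPEC =====
def Spec_audit_status_py (audit_rows : List (List (String × String))) (out : String) : Prop := out = audit_status_py_alt audit_rows
instance (audit_rows : List (List (String × String))) (out : String) : Decidable (Spec_audit_status_py audit_rows out) := by unfold Spec_audit_status_py; infer_instance

-- ===== CLAIM (what is proved, stated in full; the proofs are below) =====
def Claim_equal_audit_status_py : Prop := ∀ (audit_rows : List (List (String × String))), Dom_audit_status_py audit_rows → Spec_audit_status_py audit_rows (audit_status_py audit_rows)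

-- ===== LEMMAS AND PROOFS =====

-- the rank B assigns to a row (the body of B's loop step)
def pvRank (row : List (String × String)) : Nat :=
  PySem.Dict.getD (PySem.Dict.mk [("FAIL", 0), ("REVIEW REQUIRED", 1), ("PASS", 2)])
    (PySem.Str.upper (PySem.Dict.getD (PySem.Dict.mk row) "Status" "")) 3

-- minimum rank over a list of rows, in foldr form
def pvMinRank (rows : List (List (String × String))) : Nat :=
  rows.foldr (fun r acc => min (pvRank r) acc) 3

lemma pvRank_le (row : List (String × String)) : pvRank row ≤ 3 := by
  unfold pvRank
  rw [PySem.Dict.getD_eq_get?_getD]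
  simp only [PySem.Dict.get?_mk_cons]
  split
  · decide
  · split
    · decide
    · split
      · decide
      · simp [PySem.Dict.get?]

lemma pvRank_iff (row : List (String × String)) :
    (pvRank row = 0 ↔ PySem.Str.upper (PySem.Dict.getD (PySem.Dict.mk row) "Status" "") = "FAIL")
    ∧ (pvRank row = 1 ↔ PySem.Str.upper (PySem.Dict.getD (PySem.Dict.mk row) "Status" "") = "REVIEW REQUIRED")
    ∧ (pvRank row = 2 ↔ PySem.Str.upper (PySem.Dict.getD (PySem.Dict.mk row) "Status" "") = "PASS") := by
  unfold pvRank
  rw [PySem.Dict.getD_eq_get?_getD]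
  simp only [PySem.Dict.get?_mk_cons]
  split
  · rename_i h; rw [← eq_of_beq h]; decide
  · split
    · rename_i h; rw [← eq_of_beq h]; decide
    · split
      · rename_i h; rw [← eq_of_beq h]; decide
      · rename_i h1 h2 h3
        rw [beq_iff_eq] at h1 h2 h3
        simp [PySem.Dict.get?]
        exact ⟨fun he => h1 he.symm, fun he => h2 he.symm, fun he => h3 he.symm⟩

lemma pvMinRank_nil : pvMinRank [] = 3 := rfl

lemma pvMinRank_cons (x : List (String × String)) (xs : List (List (String × String))) :
    pvMinRank (x :: xs) = min (pvRank x) (pvMinRank xs) := rfl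

lemma pvMinRank_le (rows : List (List (String × String))) : pvMinRank rows ≤ 3 := by
  induction rows with
  | nil => simp [pvMinRank_nil]
  | cons x xs ih => rw [pvMinRank_cons]; omega

lemma pvFoldl_eq (rows : List (List (String × String))) (b : Nat) (hb : b ≤ 3) :
    rows.foldl (fun b row => if pvRank row < b then pvRank row else b) b
      = min b (pvMinRank rows) := by
  induction rows generalizing b with
  | nil => simp [pvMinRank_nil]; omega
  | cons x xs ih =>
    have hx := pvRank_le x
    simp only [List.foldl]
    rw [ih _ (by split <;> omega), pvMinRank_cons]
    split <;> omega

lemma pvMinRank_le_rank (rows : List (List (String × String))) (r : List (String × String))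
    (hm : r ∈ rows) : pvMinRank rows ≤ pvRank r := by
  induction rows with
  | nil => simp at hm
  | cons x xs ih =>
    rw [pvMinRank_cons]
    rcases List.mem_cons.mp hm with h | h
    · subst h; omega
    · have := ih h; omega

lemma pvMinRank_exists (rows : List (List (String × String))) (h : pvMinRank rows ≤ 2) :
    ∃ r ∈ rows, pvRank r = pvMinRank rows := by
  induction rows with
  | nil => rw [pvMinRank_nil] at h; omega
  | cons x xs ih =>
    rw [pvMinRank_cons] at h ⊢
    by_cases hx : pvRank x ≤ pvMinRank xs
    · exact ⟨x, List.mem_cons_self, by omega⟩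
    · obtain ⟨r, hr, hre⟩ := ih (by omega)
      exact ⟨r, List.mem_cons_of_mem _ hr, by omega⟩

lemma pvAny_iff (rows : List (List (String × String))) (k : Nat) (s : String)
    (hk : ∀ r, pvRank r = k ↔ PySem.Str.upper (PySem.Dict.getD (PySem.Dict.mk r) "Status" "") = s) :
    ((rows.map (fun row => PySem.Str.upper (PySem.Dict.getD (PySem.Dict.mk row) "Status" ""))).any
      (fun t => t == s)) = true ↔ ∃ r ∈ rows, pvRank r = k := by
  simp only [List.any_map, List.any_eq_true, Function.comp, beq_iff_eq]
  constructor
  · rintro ⟨r, hr, he⟩; exact ⟨r, hr, (hk r).mpr he⟩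
  · rintro ⟨r, hr, he⟩; exact ⟨r, hr, (hk r).mp he⟩

-- ===== VERDICT (by name: the statement is the Claim_ definition above) =====
theorem audit_status_py_spec : Claim_equal_audit_status_py := by
  intro rows _
  unfold Spec_audit_status_py audit_status_py audit_status_py_alt
  show _ = List.getD _ (rows.foldl (fun b row => if pvRank row < b then pvRank row else b) 3) _
  rw [pvFoldl_eq rows 3 (le_refl 3)]
  have hle := pvMinRank_le rows
  have h0 := pvAny_iff rows 0 "FAIL" (fun r => (pvRank_iff r).1)
  have h1 := pvAny_iff rows 1 "REVIEW REQUIRED" (fun r => (pvRank_iff r).2.1)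
  have h2 := pvAny_iff rows 2 "PASS" (fun r => (pvRank_iff r).2.2)
  have hmin := pvMinRank_le_rank rows
  rw [min_eq_right hle]
  have hno : ∀ k, pvMinRank rows > k → ¬ ∃ r ∈ rows, pvRank r = k := by
    rintro k hk ⟨r', hr', he'⟩; have := hmin r' hr'; omega
  interval_cases hm : pvMinRank rows
  · obtain ⟨r, hr, he⟩ := pvMinRank_exists rows (by omega)
    rw [hm] at he
    simp only [h0]
    rw [if_pos ⟨r, hr, he⟩]
    rfl
  · obtain ⟨r, hr, he⟩ := pvMinRank_exists rows (by omega)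
    rw [hm] at he
    simp only [h0, h1]
    rw [if_neg (hno 0 (by omega)), if_pos ⟨r, hr, he⟩]
    rfl
  · obtain ⟨r, hr, he⟩ := pvMinRank_exists rows (by omega)
    rw [hm] at he
    simp only [h0, h1, h2]
    rw [if_neg (hno 0 (by omega)), if_neg (hno 1 (by omega)), if_pos ⟨r, hr, he⟩]
    rfl
  · simp only [h0, h1, h2]
    rw [if_neg (hno 0 (by omega)), if_neg (hno 1 (by omega)), if_neg (hno 2 (by omega))]
    rfl
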